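-- pv_equiv track=rewrite | github.com/DavLivesey/Algoritm_exam_2 | Photocopies.py | spred_out_copies
-- ===== SOURCE A (Python) =====
-- def spred_out_copies(data_center_size, count_centres):
--     count_copies = 0
--     if len(data_center_size) < 2:
--         return 0
--     data_center_size.sort(reverse=True)
--     while data_center_size[0] and data_center_size[1]:
--         data_center_size[0] -= 1
--         data_center_size[1] -= 1
--         count_copies += 1
--         data_center_size.sort(reverse=True)
--     return count_copies
-- ===== SOURCE B (Python) =====
-- def spred_out_copies(data_center_size, count_centres):
--     # One pass, no sorting, no mutation: count the total positive stock and
--     # the largest positive pile; the greedy pairing yields min(total//2, total-biggest).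
--     if len(data_center_size) < 2:
--         return 0
--     total = 0
--     biggest = 0
--     for x in data_center_size:
--         if x > 0:
--             total += x
--             if x > biggest:
--                 biggest = x
--     return min(total // 2, total - biggest)
-- ===== Notes on version B (the rewrite author's own statement) =====
-- stated objective: faster
-- what changed: Replaces the simulate-and-resort-every-step loop by a single pass computing the sum and maximum of the positive entries and the closed form min(total//2, total-biggest); intended as faster (a timing run measured B 26.9x faster at the largest size where A still finished; A timed out beyond that).
-- intended difference: On lists of length >= 2 with exactly one positive entry, no zero and the rest negative, A returns that positive value (it keeps pairing the one stocked center with a negative-sized one, driving it further negative), while B returns 0, the intended count since only one center actually holds copies. — e.g. on spred_out_copies([2, -1], 0): A returns 2, B returns 0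
import Mathlib
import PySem

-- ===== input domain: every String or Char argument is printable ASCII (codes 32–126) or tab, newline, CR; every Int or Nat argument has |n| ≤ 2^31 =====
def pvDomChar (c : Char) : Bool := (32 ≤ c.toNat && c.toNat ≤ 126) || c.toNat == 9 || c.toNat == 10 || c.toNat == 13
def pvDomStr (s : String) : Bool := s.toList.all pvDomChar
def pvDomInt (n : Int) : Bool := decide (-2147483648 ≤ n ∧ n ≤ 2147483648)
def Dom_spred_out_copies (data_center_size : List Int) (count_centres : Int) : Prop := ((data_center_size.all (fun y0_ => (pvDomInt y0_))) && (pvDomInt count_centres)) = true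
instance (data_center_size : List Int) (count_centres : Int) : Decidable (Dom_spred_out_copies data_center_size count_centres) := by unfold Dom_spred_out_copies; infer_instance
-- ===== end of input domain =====

-- B replaces A's simulate-and-resort loop by one pass computing the sum and maximum of the
-- positive entries and the closed form min(total//2, total-biggest); intended as faster
-- (a timing run measured B 26.9x faster at the largest size where A still finished).
-- A sorts its argument list in place (an observable mutation); B does not mutate: the
-- equivalence proved here is about the RETURN value only.

-- ===== PORT A =====
-- The Python 'while' loop is ported with a fuel parameter; (sum of positive parts)+1 is an
-- upper bound on the iteration count on every input where the Python loop terminates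
-- (inside Pre_); outside Pre_ the Python loop never terminates.
def spredFuel (l : List Int) : Nat := (l.map (fun x => x.toNat)).sum + 1

def spredLoop : Nat → List Int → Int → Int
  | 0, _, count => count
  | fuel+1, l, count =>
    match l with
    | a :: b :: rest =>
      -- while data_center_size[0] and data_center_size[1]: decrement both, count += 1, re-sort
      if a ≠ 0 ∧ b ≠ 0 then
        spredLoop fuel (PySem.List.sorted ((a-1) :: (b-1) :: rest) (fun x => x) true) (count+1)
      else count
    | _ => count

def spred_out_copies (data_center_size : List Int) (count_centres : Int) : Int :=
  if data_center_size.length < 2 then 0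
  else spredLoop (spredFuel data_center_size)
         (PySem.List.sorted data_center_size (fun x => x) true) 0

-- ===== PORT B =====
def spred_out_copies_alt (data_center_size : List Int) (count_centres : Int) : Int :=
  if data_center_size.length < 2 then 0
  else
    let tb := data_center_size.foldl
      (fun (p : Int × Int) x => if 0 < x then (p.1 + x, if x > p.2 then x else p.2) else p)
      (0, 0)
    min (PySem.Int.floordiv tb.1 2) (tb.1 - tb.2)

-- ===== PRECONDITION & SPEC =====
-- Pre_ excludes exactly the lists of length ≥ 2 whose entries are all negative: there the
-- Python while loop never terminates (A returns on every other input).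
def Pre_spred_out_copies (data_center_size : List Int) (count_centres : Int) : Prop :=
  data_center_size.length < 2 ∨ ∃ x ∈ data_center_size, 0 ≤ x
instance (data_center_size : List Int) (count_centres : Int) : Decidable (Pre_spred_out_copies data_center_size count_centres) := by unfold Pre_spred_out_copies; infer_instance

def pvWitness_spred_out_copies : List Int × Int := ([3, 2], 0)

-- On lists of length ≥ 2 with exactly one positive entry, no zero and the rest negative, A
-- returns that positive value (it keeps pairing the one stocked center with a negative-sized
-- one, driving it further negative), while B returns 0, the intended count since only one
-- center actually holds copies.
def D_spred_out_copies (data_center_size : List Int) (count_centres : Int) : Prop :=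
  2 ≤ data_center_size.length ∧
  data_center_size.countP (fun x => decide (0 < x)) = 1 ∧
  ∀ x ∈ data_center_size, x ≠ 0
instance (data_center_size : List Int) (count_centres : Int) : Decidable (D_spred_out_copies data_center_size count_centres) := by unfold D_spred_out_copies; infer_instance

def Spec_spred_out_copies (data_center_size : List Int) (count_centres : Int) (out : Int) : Prop := ¬ D_spred_out_copies data_center_size count_centres → out = spred_out_copies_alt data_center_size count_centres
instance (data_center_size : List Int) (count_centres : Int) (out : Int) : Decidable (Spec_spred_out_copies data_center_size count_centres out) := by unfold Spec_spred_out_copies; infer_instance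

def pvDiffWitness_spred_out_copies : List Int × Int := ([2, -1], 0)
def pvDiffWitnessOut_spred_out_copies : Int × Int := (2, 0)

-- ===== CLAIM (what is proved, stated in full; the proofs are below) =====
def Claim_unchanged_spred_out_copies : Prop := ∀ (data_center_size : List Int) (count_centres : Int), Dom_spred_out_copies data_center_size count_centres → Pre_spred_out_copies data_center_size count_centres → Spec_spred_out_copies data_center_size count_centres (spred_out_copies data_center_size count_centres)
def Claim_changed_spred_out_copies : Prop := Dom_spred_out_copies (pvDiffWitness_spred_out_copies.1) (pvDiffWitness_spred_out_copies.2) ∧ Pre_spred_out_copies (pvDiffWitness_spred_out_copies.1) (pvDiffWitness_spred_out_copies.2) ∧ D_spred_out_copies (pvDiffWitness_spred_out_copies.1) (pvDiffWitness_spred_out_copies.2) ∧ spred_out_copies (pvDiffWitness_spred_out_copies.1) (pvDiffWitness_spred_out_copies.2) = pvDiffWitnessOut_spred_out_copies.1 ∧ spred_out_copies_alt (pvDiffWitness_spred_out_copies.1) (pvDiffWitness_spred_out_copies.2) = pvDiffWitnessOut_spred_out_copies.2 ∧ pvDiffWitnessOut_spred_out_copies.1 ≠ pvDiffWitnessOu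t_spred_out_copies.2
def Claim_exact_spred_out_copies : Prop := ∀ (data_center_size : List Int) (count_centres : Int), Dom_spred_out_copies data_center_size count_centres → Pre_spred_out_copies data_center_size count_centres → D_spred_out_copies data_center_size count_centres → spred_out_copies data_center_size count_centres ≠ spred_out_copies_alt data_center_size count_centres

-- ===== LEMMAS AND PROOFS =====

-- sum of the positive entries
def pvPsum (l : List Int) : Int := (l.filter (fun x => decide (0 < x))).sum
-- the step of B's running maximum, and the maximum of the positive entries (0 if none)
def pvMstep (m x : Int) : Int := if 0 < x then (if x > m then x else m) else m
def pvMpos (l : List Int) : Int := l.foldl pvMstep 0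

theorem pvPsum_nil : pvPsum [] = 0 := rfl

theorem pvPsum_cons (x : Int) (l : List Int) :
    pvPsum (x :: l) = (if 0 < x then x else 0) + pvPsum l := by
  simp [pvPsum, List.filter_cons]; split_ifs <;> simp

theorem pvPsum_nonneg (l : List Int) : 0 ≤ pvPsum l := by
  induction l with
  | nil => simp [pvPsum_nil]
  | cons x l ih => rw [pvPsum_cons]; split_ifs with h <;> omega

theorem pvMstep_shift (l : List Int) : ∀ m : Int, 0 ≤ m →
    l.foldl pvMstep m = max m (l.foldl pvMstep 0) := by
  induction l with
  | nil => intro m hm; simpa using (max_eq_left hm).symm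
  | cons x l ih =>
    intro m hm
    have hs : ∀ c : Int, 0 ≤ c → 0 ≤ pvMstep c x := by
      intro c hc; unfold pvMstep; split_ifs <;> omega
    have h1 : pvMstep m x = max m (pvMstep 0 x) := by
      unfold pvMstep; split_ifs <;> omega
    simp only [List.foldl_cons]
    rw [ih _ (hs m hm), ih _ (hs 0 le_rfl), h1, max_assoc]

theorem pvMpos_cons (x : Int) (l : List Int) :
    pvMpos (x :: l) = max (if 0 < x then x else 0) (pvMpos l) := by
  have h : pvMstep 0 x = if 0 < x then x else 0 := by unfold pvMstep; split_ifs <;> omega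
  simp only [pvMpos, List.foldl_cons]
  rw [pvMstep_shift l _ (by rw [h]; split_ifs <;> omega), h]

theorem pvMpos_nonneg (l : List Int) : 0 ≤ pvMpos l := by
  induction l with
  | nil => simp [pvMpos]
  | cons x l ih => rw [pvMpos_cons]; split_ifs <;> omega

theorem pvMpos_le_pvPsum (l : List Int) : pvMpos l ≤ pvPsum l := by
  induction l with
  | nil => simp [pvMpos, pvPsum_nil]
  | cons x l ih =>
    rw [pvMpos_cons, pvPsum_cons]
    have := pvPsum_nonneg l
    have := pvMpos_nonneg l
    split_ifs <;> omega

theorem pvMpos_le_of_forall_le (l : List Int) (c : Int) (hc : 0 ≤ c)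
    (h : ∀ x ∈ l, x ≤ c) : pvMpos l ≤ c := by
  induction l with
  | nil => simpa [pvMpos] using hc
  | cons x l ih =>
    rw [pvMpos_cons]
    have hx := h x (by simp)
    have := ih (fun y hy => h y (by simp [hy]))
    split_ifs <;> omega

theorem pvPsum_eq_zero_of_pvMpos_eq_zero (l : List Int) (h : pvMpos l = 0) :
    pvPsum l = 0 := by
  induction l with
  | nil => simp [pvPsum_nil]
  | cons x l ih =>
    rw [pvMpos_cons] at h
    have h2 := pvMpos_nonneg l
    rw [pvPsum_cons]
    by_cases hx : 0 < x
    · simp [hx] at h; omega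
    · simp [hx] at h ⊢; exact ih (by omega)

theorem pvPsum_eq_zero_of_nonpos (l : List Int) (h : ∀ x ∈ l, x ≤ 0) : pvPsum l = 0 := by
  induction l with
  | nil => simp [pvPsum_nil]
  | cons x l ih =>
    rw [pvPsum_cons]
    have hx := h x (by simp)
    have := ih (fun y hy => h y (by simp [hy]))
    split_ifs <;> omega

theorem pvPsum_perm {l l' : List Int} (h : l.Perm l') : pvPsum l = pvPsum l' :=
  (h.filter _).sum_eq

theorem pvMpos_perm {l l' : List Int} (h : l.Perm l') : pvMpos l = pvMpos l' := by
  have hc : ∀ (m : Int) (x y : Int), pvMstep (pvMstep m x) y = pvMstep (pvMstep m y) x := by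
    intro m x y; unfold pvMstep; split_ifs <;> omega
  exact @List.Perm.foldl_eq _ _ pvMstep _ _ ⟨fun m x y => hc m x y⟩ h 0

theorem pvLe_pvMpos_of_mem {l : List Int} {x : Int} (hx : x ∈ l) (hp : 0 < x) :
    x ≤ pvMpos l := by
  induction l with
  | nil => cases hx
  | cons y l ih =>
    rw [pvMpos_cons]
    rcases List.mem_cons.mp hx with rfl | hm
    · simp [hp]
    · exact le_max_of_le_right (ih hm)

-- the arithmetic heart of one greedy step (verified numerically, discharged by omega)
theorem pvStepArith (a b mr r : Int) (hab : b ≤ a) (hb : 1 ≤ b) (hmr0 : 0 ≤ mr)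
    (hmrb : mr ≤ b) (hmrr : mr ≤ r) (hr : 0 ≤ r) (h0 : mr = 0 → r = 0) :
    1 + min (PySem.Int.floordiv (a + b + r - 2) 2)
        (a + b + r - 2 - max (if 0 < a - 1 then a - 1 else 0)
          (max (if 0 < b - 1 then b - 1 else 0) mr)) =
    min (PySem.Int.floordiv (a + b + r) 2) (a + b + r - max a (max b mr)) := by
  simp only [PySem.Int.floordiv_eq_ediv_of_pos (show (0:Int) < 2 by norm_num)]
  split_ifs <;> omega

-- countP of positives is 0 on an all-nonpositive list
theorem pvCountP_zero_of_nonpos (l : List Int) (h : ∀ x ∈ l, x ≤ 0) :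
    l.countP (fun x => decide (0 < x)) = 0 := by
  apply List.countP_eq_zero.mpr
  intro x hx; simpa using not_lt.mpr (h x hx)

-- the invariant: a zero is present, or at least two entries are positive
def pvInv (l : List Int) : Prop :=
  0 ∈ l ∨ 2 ≤ l.countP (fun x => decide (0 < x))

-- main loop characterisation outside the D_ region
theorem pvLoop_eq : ∀ (fuel : Nat) (l : List Int) (count : Int),
    l.Pairwise (fun a b => b ≤ a) → 2 ≤ l.length → pvInv l →
    pvPsum l < (fuel : Int) →
    spredLoop fuel l count
      = count + min (PySem.Int.floordiv (pvPsum l) 2) (pvPsum l - pvMpos l) := by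
  intro fuel
  induction fuel with
  | zero =>
    intro l count _ _ _ hf
    have := pvPsum_nonneg l
    simp only [Nat.cast_zero] at hf
    omega
  | succ fuel ih =>
    intro l count hpw hlen hinv hf
    cases l with
    | nil => simp at hlen
    | cons a t =>
      cases t with
      | nil => simp at hlen
      | cons b rest =>
        obtain ⟨ha, hpw'⟩ := List.pairwise_cons.mp hpw
        obtain ⟨hb, -⟩ := List.pairwise_cons.mp hpw'
        have hba : b ≤ a := ha b (by simp)
        set r := pvPsum rest with hrdef
        set mr := pvMpos rest with hmrdef
        have hr0 : 0 ≤ r := pvPsum_nonneg rest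
        have hmr0 : 0 ≤ mr := pvMpos_nonneg rest
        have hmrr : mr ≤ r := pvMpos_le_pvPsum rest
        have hmr00 : mr = 0 → r = 0 := fun h => pvPsum_eq_zero_of_pvMpos_eq_zero rest h
        by_cases hc : a ≠ 0 ∧ b ≠ 0
        · -- the loop takes a step
          have hb1 : 1 ≤ b := by
            rcases lt_or_ge 0 b with h | h
            · omega
            · exfalso
              have hbneg : b < 0 := lt_of_le_of_ne h hc.2
              rcases hinv with h0 | h2
              · rcases List.mem_cons.mp h0 with h' | h'
                · exact hc.1 h'.symm
                · rcases List.mem_cons.mp h' with h'' | h''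
                  · exact hc.2 h''.symm
                  · have := hb 0 h''; omega
              · have hrest0 : rest.countP (fun x => decide (0 < x)) = 0 :=
                  pvCountP_zero_of_nonpos rest (fun x hx => le_of_lt (lt_of_le_of_lt (hb x hx) hbneg))
                simp only [List.countP_cons, hrest0] at h2
                have : ¬ (0 < b) := not_lt.mpr h
                simp [this] at h2
                split_ifs at h2 <;> omega
          have ha1 : 1 ≤ a := le_trans hb1 hba
          have ha0 : 0 < a := by omega
          have hb0 : 0 < b := by omega
          -- the re-sorted list after the step
          set l0 : List Int := (a-1) :: (b-1) :: rest with hl0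
          set l' : List Int := PySem.List.sorted l0 (fun x => x) true with hl'
          have hperm : l'.Perm l0 := PySem.List.sorted_perm l0 (fun x => x) true
          have hpw'' : l'.Pairwise (fun x y => y ≤ x) :=
            PySem.List.sorted_pairwise_rev l0 (fun x => x)
          have hlen' : 2 ≤ l'.length := by
            rw [hperm.length_eq, hl0]; simp
          have hP : pvPsum (a :: b :: rest) = a + b + r := by
            rw [pvPsum_cons, pvPsum_cons, if_pos ha0, if_pos hb0]; ring
          have hP' : pvPsum l' = a + b + r - 2 := by
            rw [pvPsum_perm hperm, hl0, pvPsum_cons, pvPsum_cons]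
            split_ifs <;> omega
          have hM : pvMpos (a :: b :: rest) = max a (max b mr) := by
            rw [pvMpos_cons, pvMpos_cons, if_pos ha0, if_pos hb0]
          have hM' : pvMpos l' = max (if 0 < a - 1 then a - 1 else 0)
              (max (if 0 < b - 1 then b - 1 else 0) mr) := by
            rw [pvMpos_perm hperm, hl0, pvMpos_cons, pvMpos_cons]
          have hinv' : pvInv l' := by
            unfold pvInv
            by_cases hb2 : b - 1 = 0
            · left
              rw [hperm.mem_iff, hl0]
              simp [hb2]
            · right
              rw [hperm.countP_eq, hl0]
              simp only [List.countP_cons]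
              have e1 : decide (0 < a - 1) = true := by simp; omega
              have e2 : decide (0 < b - 1) = true := by simp; omega
              rw [e1, e2]
              simp
          have hf' : pvPsum l' < (fuel : Int) := by
            rw [hP'] at *
            rw [hP] at hf
            push_cast at hf ⊢
            omega
          have hstep : spredLoop (fuel + 1) (a :: b :: rest) count
              = spredLoop fuel l' (count + 1) := by
            simp only [spredLoop, if_pos hc, hl', hl0]
          rw [hstep, ih l' (count + 1) hpw'' hlen' hinv' hf', hP, hM, hP', hM']
          have harith := pvStepArith a b mr r hba hb1 hmr0
            (le_trans (pvMpos_le_of_forall_le rest b (by omega) hb) le_rfl) hmrr hr0 hmr00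
          rw [add_assoc, harith]
        · -- the loop exits immediately
          have hstep : spredLoop (fuel + 1) (a :: b :: rest) count = count := by
            simp only [spredLoop, if_neg hc]
          rw [hstep]
          rcases Decidable.not_and_iff_or_not.mp hc with h0 | h0 <;> push_neg at h0
          · -- a = 0: every entry is ≤ 0
            have hall : ∀ x ∈ (a :: b :: rest), x ≤ 0 := by
              intro x hx
              rcases List.mem_cons.mp hx with rfl | hx'
              · omega
              · have := ha x hx'; omega
            have hP0 := pvPsum_eq_zero_of_nonpos _ hall
            have hM0 := (pvMpos_le_of_forall_le _ 0 le_rfl hall).antisymm (pvMpos_nonneg _)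
            rw [hP0, hM0]
            have : PySem.Int.floordiv 0 2 = 0 := by decide
            rw [this]
            omega
          · -- b = 0, a > 0: a single positive pile next to a zero
            subst h0
            by_cases haz : a = 0
            · subst haz
              have hall : ∀ x ∈ ((0:Int) :: 0 :: rest), x ≤ 0 := by
                intro x hx
                rcases List.mem_cons.mp hx with rfl | hx'
                · omega
                · rcases List.mem_cons.mp hx' with rfl | hx''
                  · omega
                  · have := hb x hx''; omega
              have hP0 := pvPsum_eq_zero_of_nonpos _ hall
              have hM0 := (pvMpos_le_of_forall_le _ 0 le_rfl hall).antisymm (pvMpos_nonneg _)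
              rw [hP0, hM0]
              have hz : PySem.Int.floordiv 0 2 = 0 := by decide
              rw [hz]
              omega
            have ha0 : 0 < a := lt_of_le_of_ne hba (Ne.symm haz)
            have hrest : ∀ x ∈ rest, x ≤ 0 := fun x hx => hb x hx
            have hP0 := pvPsum_eq_zero_of_nonpos rest hrest
            have hM0 := (pvMpos_le_of_forall_le rest 0 le_rfl hrest).antisymm (pvMpos_nonneg rest)
            have hP : pvPsum (a :: 0 :: rest) = a := by
              rw [pvPsum_cons, pvPsum_cons, if_pos ha0]; simp [hP0]
            have hM : pvMpos (a :: 0 :: rest) = a := by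
              rw [pvMpos_cons, pvMpos_cons, if_pos ha0]
              simp [hM0]
              omega
            rw [hP, hM, PySem.Int.floordiv_eq_ediv_of_pos (show (0:Int) < 2 by norm_num)]
            omega

-- loop characterisation inside the D_ region: exactly one positive entry, no zeros
theorem pvLoop_eq_D : ∀ (fuel : Nat) (l : List Int) (count : Int),
    l.Pairwise (fun a b => b ≤ a) → 2 ≤ l.length →
    l.countP (fun x => decide (0 < x)) = 1 → (∀ x ∈ l, x ≠ 0) →
    pvPsum l < (fuel : Int) →
    spredLoop fuel l count = count + pvPsum l := by
  intro fuel
  induction fuel with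
  | zero =>
    intro l count _ _ _ _ hf
    have := pvPsum_nonneg l
    simp only [Nat.cast_zero] at hf
    omega
  | succ fuel ih =>
    intro l count hpw hlen hcnt hnz hf
    cases l with
    | nil => simp at hlen
    | cons a t =>
      cases t with
      | nil => simp at hlen
      | cons b rest =>
        obtain ⟨ha, hpw'⟩ := List.pairwise_cons.mp hpw
        obtain ⟨hb, -⟩ := List.pairwise_cons.mp hpw'
        have hba : b ≤ a := ha b (by simp)
        have hapos : 0 < a := by
          have hex : ∃ x ∈ (a :: b :: rest), 0 < x := by
            simpa using List.countP_pos_iff.mp (show 0 < (a :: b :: rest).countP (fun x => decide (0 < x)) by omega)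
          obtain ⟨x, hx, hpx⟩ := hex
          rcases List.mem_cons.mp hx with rfl | hx'
          · exact hpx
          · exact lt_of_lt_of_le hpx (ha x hx')
        have hbneg : b < 0 := by
          rcases lt_trichotomy b 0 with h | h | h
          · exact h
          · exact absurd h (hnz b (by simp))
          · exfalso
            rw [List.countP_cons, List.countP_cons] at hcnt
            simp [hapos, h] at hcnt
        have hrestneg : ∀ x ∈ rest, x < 0 := fun x hx => lt_of_le_of_lt (hb x hx) hbneg
        have hrest0 : pvPsum rest = 0 :=
          pvPsum_eq_zero_of_nonpos rest (fun x hx => le_of_lt (hrestneg x hx))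
        have hrestc : rest.countP (fun x => decide (0 < x)) = 0 :=
          pvCountP_zero_of_nonpos rest (fun x hx => le_of_lt (hrestneg x hx))
        have hP : pvPsum (a :: b :: rest) = a := by
          rw [pvPsum_cons, pvPsum_cons, if_pos hapos, if_neg (by omega : ¬ (0:Int) < b), hrest0]
          ring
        have hcond : a ≠ 0 ∧ b ≠ 0 := ⟨by omega, by omega⟩
        have hstep : spredLoop (fuel + 1) (a :: b :: rest) count
            = spredLoop fuel (PySem.List.sorted ((a-1) :: (b-1) :: rest) (fun x => x) true) (count + 1) := by
          simp only [spredLoop, if_pos hcond]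
        have hperm := PySem.List.sorted_perm ((a-1) :: (b-1) :: rest) (fun x => x) true
        by_cases ha1 : a = 1
        · -- a-1 = 0: the next comparison sees a zero at the head and the loop stops
          subst ha1
          have hall0 : ∀ y ∈ ((0:Int) :: (b-1) :: rest), y ≤ 0 := by
            intro y hy
            rcases List.mem_cons.mp hy with rfl | hy'
            · omega
            · rcases List.mem_cons.mp hy' with rfl | hy''
              · omega
              · exact le_of_lt (hrestneg y hy'')
          rcases hsort : PySem.List.sorted ((1-1 : Int) :: (b-1) :: rest) (fun x => x) true with _ | ⟨c, t⟩
          · exfalso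
            have := hperm.length_eq
            rw [show ((1:Int)-1) = 0 by norm_num] at hsort
            rw [show ((1:Int)-1) = 0 by norm_num] at this
            rw [hsort] at this
            simp at this
          · have hsort' : PySem.List.sorted ((0 : Int) :: (b-1) :: rest) (fun x => x) true = c :: t := by
              rw [show ((0:Int)) = 1-1 by norm_num]; exact hsort
            have hcperm : (c :: t).Perm ((0:Int) :: (b-1) :: rest) := by
              rw [← hsort']; exact PySem.List.sorted_perm _ _ _
            have hc0 : c = 0 := by
              have h1 : c ≤ 0 := hall0 c (hcperm.subset (by simp))
              have h2 : (0:Int) ≤ c := PySem.List.key_head_sorted_rev_ge _ _ hsort' 0 (by simp)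
              omega
            cases t with
            | nil =>
              exfalso
              have := hcperm.length_eq
              simp at this
            | cons d t' =>
              cases fuel with
              | zero =>
                exfalso
                rw [hP] at hf
                simp at hf
              | succ fuel2 =>
                rw [hstep]
                rw [show ((1:Int)-1) = 0 by norm_num, hsort', hc0]
                have hexit : spredLoop (fuel2 + 1) ((0:Int) :: d :: t') (count + 1) = count + 1 := by
                  simp [spredLoop]
                rw [hexit, hP]
        · -- a ≥ 2: one more copy and recurse on the re-sorted list
          have ha2 : 2 ≤ a := by omega
          have hpw'' := PySem.List.sorted_pairwise_rev ((a-1) :: (b-1) :: rest) (fun x => x)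
          have hlen' : 2 ≤ (PySem.List.sorted ((a-1) :: (b-1) :: rest) (fun x => x) true).length := by
            rw [hperm.length_eq]; simp
          have hcnt' : (PySem.List.sorted ((a-1) :: (b-1) :: rest) (fun x => x) true).countP
              (fun x => decide (0 < x)) = 1 := by
            rw [hperm.countP_eq, List.countP_cons, List.countP_cons, hrestc]
            have e1 : decide (0 < a - 1) = true := by simp; omega
            have e2 : decide (0 < b - 1) = false := by simp; omega
            rw [e1, e2]
            simp
          have hnz' : ∀ x ∈ PySem.List.sorted ((a-1) :: (b-1) :: rest) (fun x => x) true, x ≠ 0 := by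
            intro x hx
            rcases List.mem_cons.mp (hperm.subset hx) with rfl | hx'
            · omega
            · rcases List.mem_cons.mp hx' with rfl | hx''
              · omega
              · exact fun h => absurd (h ▸ hrestneg x hx'') (by norm_num)
          have hP' : pvPsum (PySem.List.sorted ((a-1) :: (b-1) :: rest) (fun x => x) true) = a - 1 := by
            rw [pvPsum_perm hperm, pvPsum_cons, pvPsum_cons, if_pos (by omega : (0:Int) < a - 1),
                if_neg (by omega : ¬ (0:Int) < b - 1), hrest0]
            ring
          have hf' : pvPsum (PySem.List.sorted ((a-1) :: (b-1) :: rest) (fun x => x) true) < (fuel : Int) := by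
            rw [hP']
            rw [hP] at hf
            push_cast at hf ⊢
            omega
          rw [hstep, ih _ (count + 1) hpw'' hlen' hcnt' hnz' hf', hP, hP']
          ring

-- B's fold computes (pvPsum, pvMpos)
theorem pvFold_eq (l : List Int) : ∀ (t b : Int),
    l.foldl (fun (p : Int × Int) x => if 0 < x then (p.1 + x, if x > p.2 then x else p.2) else p) (t, b)
      = (t + pvPsum l, l.foldl pvMstep b) := by
  induction l with
  | nil => intro t b; simp [pvPsum_nil]
  | cons x l ih =>
    intro t b
    simp only [List.foldl_cons]
    by_cases hx : 0 < x
    · simp only [hx, if_pos, pvMstep, ih, pvPsum_cons]; ring_nf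
    · simp only [hx, if_neg, pvMstep, if_false, ih, pvPsum_cons]; simp [hx]

theorem pvAlt_closed (l : List Int) (cc : Int) (hl : ¬ l.length < 2) :
    spred_out_copies_alt l cc
      = min (PySem.Int.floordiv (pvPsum l) 2) (pvPsum l - pvMpos l) := by
  simp only [spred_out_copies_alt, hl, if_false, pvFold_eq l 0 0]
  simp [pvMpos]

theorem pvPsum_le_fuel (l : List Int) : pvPsum l < (spredFuel l : Int) := by
  have key : ∀ l : List Int, pvPsum l ≤ (((l.map (fun x => x.toNat)).sum : Nat) : Int) := by
    intro l
    induction l with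
    | nil => simp [pvPsum_nil]
    | cons x l ih =>
      rw [pvPsum_cons]
      simp only [List.map_cons, List.sum_cons, Nat.cast_add]
      split_ifs <;> omega
  have h := key l
  unfold spredFuel
  simp only [Nat.cast_add, Nat.cast_one]
  omega

theorem pvCountP_one_psum (l : List Int) (h : l.countP (fun x => decide (0 < x)) = 1) :
    pvPsum l = pvMpos l := by
  induction l with
  | nil => simp at h
  | cons x l ih =>
    rw [List.countP_cons] at h
    rw [pvPsum_cons, pvMpos_cons]
    by_cases hx : 0 < x
    · simp [hx] at h ⊢
      have h1 := pvPsum_eq_zero_of_nonpos l h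
      have h2 := (pvMpos_le_of_forall_le l 0 le_rfl h).antisymm (pvMpos_nonneg l)
      omega
    · simp [hx] at h ⊢
      have h3 := ih h
      have := pvMpos_nonneg l
      omega

-- ===== VERDICT (by name: the statement is the Claim_ definition above) =====
theorem spred_out_copies_spec : Claim_unchanged_spred_out_copies := by
  intro l cc _ hpre
  unfold Spec_spred_out_copies
  intro hnd
  by_cases hlen : l.length < 2
  · simp [spred_out_copies, spred_out_copies_alt, hlen]
  · have hlen2 : 2 ≤ l.length := by omega
    have hperm := PySem.List.sorted_perm l (fun x => x) true
    have hinv : pvInv (PySem.List.sorted l (fun x => x) true) := by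
      unfold pvInv
      rw [hperm.mem_iff, hperm.countP_eq]
      rcases hpre with h | ⟨x, hx, hx0⟩
      · omega
      by_cases hz : (0:Int) ∈ l
      · exact Or.inl hz
      right
      have hnzl : ∀ y ∈ l, y ≠ 0 := fun y hy h => hz (h ▸ hy)
      have hne1 : l.countP (fun x => decide (0 < x)) ≠ 1 := by
        intro h1
        exact hnd ⟨hlen2, h1, hnzl⟩
      have hne0 : l.countP (fun x => decide (0 < x)) ≠ 0 := by
        intro h0
        have := List.countP_eq_zero.mp h0 x hx
        simp at this
        have : x = 0 := by omega
        exact hz (this ▸ hx)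
      omega
    have hmain := pvLoop_eq (spredFuel l) (PySem.List.sorted l (fun x => x) true) 0
      (PySem.List.sorted_pairwise_rev l (fun x => x))
      (by rw [hperm.length_eq]; omega) hinv
      (by rw [pvPsum_perm hperm]; exact pvPsum_le_fuel l)
    unfold spred_out_copies
    rw [if_neg hlen, hmain, pvPsum_perm hperm, pvMpos_perm hperm, pvAlt_closed l cc hlen]
    ring

theorem spred_out_copies_changed : Claim_changed_spred_out_copies := by
  unfold Claim_changed_spred_out_copies; decide

theorem spred_out_copies_tight : Claim_exact_spred_out_copies := by
  intro l cc _ hpre hd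
  obtain ⟨hlen2, hcnt, hnz⟩ := hd
  have hlt : ¬ l.length < 2 := by omega
  have hperm := PySem.List.sorted_perm l (fun x => x) true
  have hA : spred_out_copies l cc = pvPsum l := by
    unfold spred_out_copies
    rw [if_neg hlt]
    rw [pvLoop_eq_D (spredFuel l) _ 0
      (PySem.List.sorted_pairwise_rev l (fun x => x))
      (by rw [hperm.length_eq]; omega)
      (by rw [hperm.countP_eq]; exact hcnt)
      (fun x hx => hnz x (hperm.subset hx))
      (by rw [pvPsum_perm hperm]; exact pvPsum_le_fuel l),
      pvPsum_perm hperm]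
    ring
  have hB : spred_out_copies_alt l cc = 0 := by
    rw [pvAlt_closed l cc hlt, ← pvCountP_one_psum l hcnt,
        PySem.Int.floordiv_eq_ediv_of_pos (show (0:Int) < 2 by norm_num)]
    have := pvPsum_nonneg l
    omega
  have hPpos : 0 < pvPsum l := by
    have hex : ∃ x ∈ l, 0 < x := by
      simpa using List.countP_pos_iff.mp (show 0 < l.countP (fun x => decide (0 < x)) by omega)
    obtain ⟨x, hx, hpx⟩ := hex
    have h1 := pvLe_pvMpos_of_mem hx hpx
    have h2 := pvCountP_one_psum l hcnt
    omega
  rw [hA, hB]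
  omega
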